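-- pv_equiv track=rewrite | github.com/seongbeenkim/Algorithm-python | Programmers/Level1/모의고사(mock exam).py | solution
-- ===== SOURCE A (Python) =====
-- first_student = [1, 2, 3, 4, 5]
--
-- second_student = [2, 1, 2, 3, 2, 4, 2, 5]
--
-- third_student = [3, 3, 1, 1, 2, 2, 4, 4, 5, 5]
--
-- def solution(answers):
--     answer = []
--     n = len(answers)
--     first_count = 0
--     second_count = 0
--     third_count = 0
--
--     for i in range(n):
--         if first_student[i % len(first_student)] == answers[i]:
--             first_count += 1
--         if second_student[i % len(second_student)] == answers[i]:
--             second_count += 1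
--         if third_student[i % len(third_student)] == answers[i]:
--             third_count += 1
--
--     temp = [first_count, second_count, third_count]
--
--     for index, value in enumerate(temp):
--         if value == max(temp):
--             answer.append(index+1)
--
--     return answer
-- ===== SOURCE B (Python) =====
-- def solution(answers):
--     def score(pattern):
--         count = 0
--         rem = []
--         for a in answers:
--             if not rem:
--                 rem = list(pattern)
--             if rem.pop(0) == a:
--                 count += 1
--         return count
--
--     temp = [score([1, 2, 3, 4, 5]),
--             score([2, 1, 2, 3, 2, 4, 2, 5]),
--             score([3, 3, 1, 1, 2, 2, 4, 4, 5, 5])]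
--     m = max(temp)
--     return [i + 1 for i, v in enumerate(temp) if v == m]
-- ===== Notes on version B (the rewrite author's own statement) =====
-- stated objective: alternative
-- what changed: Each student's score is computed by its own pass that consumes a working copy of the pattern and refills it when exhausted (no index arithmetic, no modulo), instead of A's single fused index loop with i % len lookups; the winners are picked with max plus a comprehension instead of an append loop.
import Mathlib
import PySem

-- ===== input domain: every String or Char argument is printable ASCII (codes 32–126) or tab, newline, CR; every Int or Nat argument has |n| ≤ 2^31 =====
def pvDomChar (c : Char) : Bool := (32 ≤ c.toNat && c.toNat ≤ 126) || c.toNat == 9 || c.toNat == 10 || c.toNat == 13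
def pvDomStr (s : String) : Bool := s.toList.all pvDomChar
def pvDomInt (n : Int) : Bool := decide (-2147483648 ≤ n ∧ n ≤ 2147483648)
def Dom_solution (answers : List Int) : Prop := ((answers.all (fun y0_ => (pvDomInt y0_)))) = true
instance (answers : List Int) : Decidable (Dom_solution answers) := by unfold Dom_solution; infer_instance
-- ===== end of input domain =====

-- B replaces A's fused index loop with i % len lookups by one pattern-consuming pass per student
-- (a working copy of the pattern is consumed and refilled); same results, same cost (objective: alternative).

-- ===== PORT A =====
def first_student : List Int := [1, 2, 3, 4, 5]
def second_student : List Int := [2, 1, 2, 3, 2, 4, 2, 5]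
def third_student : List Int := [3, 3, 1, 1, 2, 2, 4, 4, 5, 5]

def solution (answers : List Int) : List Int :=
  -- the loop: i runs over range(n); answers[i] is always in range, so pyGetD's default is never used
  let counts := (PySem.List.pyRange 0 (answers.length : Int) 1).foldl
    (fun (s : Int × Int × Int) i =>
      (if PySem.List.pyGetD first_student (PySem.Int.mod i (first_student.length : Int)) 0 = PySem.List.pyGetD answers i 0 then s.1 + 1 else s.1,
       if PySem.List.pyGetD second_student (PySem.Int.mod i (second_student.length : Int)) 0 = PySem.List.pyGetD answers i 0 then s.2.1 + 1 else s.2.1,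
       if PySem.List.pyGetD third_student (PySem.Int.mod i (third_student.length : Int)) 0 = PySem.List.pyGetD answers i 0 then s.2.2 + 1 else s.2.2))
    (0, 0, 0)
  let temp : List Int := [counts.1, counts.2.1, counts.2.2]
  -- max(temp): temp is nonempty, so max? is some; the getD default is never used
  (PySem.List.enumerate temp 0).foldl
    (fun answer iv => if iv.2 = (PySem.List.max? temp id).getD 0 then answer ++ [iv.1 + 1] else answer) []

-- ===== PORT B =====
-- score(pattern): walk the answers, consuming a working copy `rem` of the pattern,
-- refilling it whenever it is empty; `c` is the running count.
def cycScore (pat : List Int) : List Int → List Int → Int → Int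
  | [], _, c => c
  | a :: rest, [], c =>
      match pat with
      | [] => c        -- unreachable for the nonempty patterns B uses (Python would raise on pop)
      | p :: ps => cycScore pat rest ps (if p = a then c + 1 else c)
  | a :: rest, p :: ps, c => cycScore pat rest ps (if p = a then c + 1 else c)

def solution_alt (answers : List Int) : List Int :=
  let temp : List Int :=
    [cycScore [1, 2, 3, 4, 5] answers [] 0,
     cycScore [2, 1, 2, 3, 2, 4, 2, 5] answers [] 0,
     cycScore [3, 3, 1, 1, 2, 2, 4, 4, 5, 5] answers [] 0]
  let m := (PySem.List.max? temp id).getD 0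
  (PySem.List.enumerate temp 0).filterMap (fun iv => if iv.2 = m then some (iv.1 + 1) else none)

-- ===== PRECONDITION & SPEC =====
def Spec_solution (answers : List Int) (out : List Int) : Prop := out = solution_alt answers
instance (answers : List Int) (out : List Int) : Decidable (Spec_solution answers out) := by unfold Spec_solution; infer_instance

-- ===== CLAIM (what is proved, stated in full; the proofs are below) =====
def Claim_equal_solution : Prop := ∀ (answers : List Int), Dom_solution answers → Spec_solution answers (solution answers)

-- ===== LEMMAS AND PROOFS =====

-- reference score: sum over the suffix xs of answers starting at absolute index k,
-- comparing each element against pat[(index) % len(pat)]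
def rScore (pat : List Int) : Nat → List Int → Int
  | _, [] => 0
  | k, a :: rest => (if pat.getD (k % pat.length) 0 = a then 1 else 0) + rScore pat (k + 1) rest

lemma cycScore_nil_refill (pat : List Int) (xs : List Int) (c : Int) :
    cycScore pat xs [] c = cycScore pat xs pat c := by
  cases xs with
  | nil => cases pat <;> rfl
  | cons a rest => cases pat <;> rfl

lemma cycScore_eq_rScore (pat : List Int) (hp : pat ≠ []) (xs : List Int) :
    ∀ (k : Nat) (c : Int), cycScore pat xs (pat.drop (k % pat.length)) c = c + rScore pat k xs := by
  induction xs with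
  | nil =>
    intro k c
    cases h : pat.drop (k % pat.length) <;> simp [cycScore, rScore]
  | cons a rest ih =>
    intro k c
    have hL : 0 < pat.length := List.length_pos_of_ne_nil hp
    have hr : k % pat.length < pat.length := Nat.mod_lt _ hL
    rw [List.drop_eq_getElem_cons hr]
    have hget : pat[k % pat.length] = pat.getD (k % pat.length) 0 := (List.getD_eq_getElem _ _ hr).symm
    by_cases hlast : k % pat.length + 1 = pat.length
    · -- pattern exhausted: the next step refills
      have hdrop : pat.drop (k % pat.length + 1) = [] := by
        rw [hlast]; exact List.drop_length
      have e1 := Nat.div_add_mod k pat.length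
      have hmul : k + 1 = pat.length * (k / pat.length) + pat.length := by omega
      have hdvd : pat.length ∣ k + 1 := ⟨k / pat.length + 1, by rw [hmul]; ring⟩
      have hnext : (k + 1) % pat.length = 0 := Nat.dvd_iff_mod_eq_zero.mp hdvd
      calc cycScore pat (a :: rest) (pat[k % pat.length] :: pat.drop (k % pat.length + 1)) c
          = cycScore pat rest (pat.drop (k % pat.length + 1)) (if pat[k % pat.length] = a then c + 1 else c) := by
            simp only [cycScore]
        _ = cycScore pat rest (pat.drop ((k + 1) % pat.length)) (if pat[k % pat.length] = a then c + 1 else c) := by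
            rw [hdrop, hnext, List.drop_zero, cycScore_nil_refill]
        _ = (if pat[k % pat.length] = a then c + 1 else c) + rScore pat (k + 1) rest := ih _ _
        _ = c + rScore pat k (a :: rest) := by
            simp only [rScore, hget]; split_ifs <;> ring
    · have hone : 1 % pat.length = 1 := Nat.mod_eq_of_lt (by omega)
      have hnext : (k + 1) % pat.length = k % pat.length + 1 := by
        rw [Nat.add_mod, hone, Nat.mod_eq_of_lt (by omega)]
      calc cycScore pat (a :: rest) (pat[k % pat.length] :: pat.drop (k % pat.length + 1)) c
          = cycScore pat rest (pat.drop ((k + 1) % pat.length)) (if pat[k % pat.length] = a then c + 1 else c) := by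
            rw [hnext]; simp only [cycScore]
        _ = (if pat[k % pat.length] = a then c + 1 else c) + rScore pat (k + 1) rest := ih _ _
        _ = c + rScore pat k (a :: rest) := by
            simp only [rScore, hget]; split_ifs <;> ring

lemma cycScore_full (pat : List Int) (hp : pat ≠ []) (xs : List Int) :
    cycScore pat xs [] 0 = rScore pat 0 xs := by
  rw [cycScore_nil_refill]
  have h := cycScore_eq_rScore pat hp xs 0 0
  simpa using h

-- A's fused loop computes the three reference scores
lemma loopA (answers : List Int) : ∀ (xs pre : List Int) (s : Int × Int × Int),
    answers = pre ++ xs →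
    (PySem.List.pyRange (pre.length : Int) (answers.length : Int) 1).foldl
      (fun (s : Int × Int × Int) i =>
        (if PySem.List.pyGetD first_student (PySem.Int.mod i (first_student.length : Int)) 0 = PySem.List.pyGetD answers i 0 then s.1 + 1 else s.1,
         if PySem.List.pyGetD second_student (PySem.Int.mod i (second_student.length : Int)) 0 = PySem.List.pyGetD answers i 0 then s.2.1 + 1 else s.2.1,
         if PySem.List.pyGetD third_student (PySem.Int.mod i (third_student.length : Int)) 0 = PySem.List.pyGetD answers i 0 then s.2.2 + 1 else s.2.2)) s
      = (s.1 + rScore first_student pre.length xs,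
         s.2.1 + rScore second_student pre.length xs,
         s.2.2 + rScore third_student pre.length xs) := by
  intro xs
  induction xs with
  | nil =>
    intro pre s h
    have hlen : answers.length = pre.length := by simp [h]
    rw [hlen, PySem.List.pyRange_one_eq_nil (le_refl _)]
    simp [rScore]
  | cons a rest ih =>
    intro pre s h
    have hlt : (pre.length : Int) < (answers.length : Int) := by
      have : answers.length = pre.length + (rest.length + 1) := by simp [h]
      omega
    rw [PySem.List.pyRange_one_cons hlt]
    rw [List.foldl_cons]
    have hpre1 : ((pre.length : Int) + 1) = ((pre ++ [a]).length : Int) := by simp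
    have hga : PySem.List.pyGetD answers (pre.length : Int) 0 = a := by
      rw [PySem.List.pyGetD_natCast]
      rw [h, List.getD_eq_getElem _ _ (by simp)]
      simp
    have hmod : ∀ (pat : List Int), PySem.List.pyGetD pat (PySem.Int.mod (pre.length : Int) (pat.length : Int)) 0
        = pat.getD (pre.length % pat.length) 0 := by
      intro pat
      rw [PySem.Int.mod_natCast, PySem.List.pyGetD_natCast]
    rw [hpre1, ih (pre ++ [a]) _ (by simp [h])]
    have hlen2 : (pre ++ [a]).length = pre.length + 1 := by simp
    rw [hlen2]
    simp only [hga, hmod]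
    refine Prod.ext ?_ (Prod.ext ?_ ?_) <;>
      · simp only [rScore]
        split_ifs <;> ring

-- the winner-selection tails agree for any three scores and threshold
lemma sel_eq (t1 t2 t3 m : Int) :
    (PySem.List.enumerate [t1, t2, t3] 0).foldl
        (fun answer iv => if iv.2 = m then answer ++ [iv.1 + 1] else answer) ([] : List Int)
      = (PySem.List.enumerate [t1, t2, t3] 0).filterMap
        (fun iv => if iv.2 = m then some (iv.1 + 1) else none) := by
  have he : PySem.List.enumerate [t1, t2, t3] 0 = [(0, t1), (1, t2), (2, t3)] := by
    simp [PySem.List.enumerate]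
  rw [he]
  simp only [List.foldl_cons, List.foldl_nil, List.filterMap_cons, List.filterMap_nil]
  split_ifs <;> simp

-- ===== VERDICT (by name: the statement is the Claim_ definition above) =====
theorem solution_spec : Claim_equal_solution := by
  intro answers _
  unfold Spec_solution solution solution_alt
  have hA := loopA answers answers [] (0, 0, 0) rfl
  simp only [List.length_nil, Nat.cast_zero] at hA
  rw [hA]
  simp only [zero_add]
  rw [← cycScore_full first_student (by decide) answers,
      ← cycScore_full second_student (by decide) answers,
      ← cycScore_full third_student (by decide) answers]
  simp only [first_student, second_student, third_student]
  exact sel_eq _ _ _ _
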